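-- pv_equiv track=rewrite | github.com/wswfws/python_task_go | score_counter.py | count_chinese_score
-- ===== SOURCE A (Python) =====
-- def count_chinese_score(board):
--     size = len(board)
--
--     def is_within_bounds(row, col):
--         """Проверка, что координаты находятся в пределах доски"""
--         return 0 <= row < size and 0 <= col < size
--
--     def get_group(row, col):
--         """Получение группы связанных камней|пустых полей"""
--         _color = board[row][col]
--         connected_stones = set()
--         stack = [(row, col)]
--         while stack:
--             current_row, current_col = stack.pop()
--             if (current_row, current_col) in connected_stones:
--                 continue
--             connected_stones.add((current_row, current_col))
--             for delta_row, delta_col in [(-1, 0), (1, 0), (0, -1), (0, 1)]: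
--                 new_row, new_col = current_row + delta_row, current_col + delta_col
--                 if (
--                         is_within_bounds(new_row, new_col) and
--                         board[new_row][new_col] == _color and
--                         (new_row, new_col) not in connected_stones
--                 ):
--                     stack.append((new_row, new_col))
--         return connected_stones
--
--     black_score = 0
--     white_score = 0
--     visited = set()
--
--     for i in range(size):
--         for j in range(size):
--             if (i, j) not in visited:
--                 if board[i][j] == 'B':
--                     black_score += 1  # Черный камень добавляется к счету
--                 elif board[i][j] == 'W':
--                     white_score += 1  # Белый камень добавляется к счету
--                 elif board[i][j] == '.':
--                     # Проверяем территории
--                     group = get_group(i, j)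
--                     around_color = set()
--                     for r, c in group:
--                         visited.add((r, c))
--                         for dr, dc in [(-1, 0), (1, 0), (0, -1), (0, 1)]:
--                             nr, nc = r + dr, c + dc
--                             if is_within_bounds(nr, nc) and board[nr][nc] != board[i][j]:
--                                 around_color.add(board[nr][nc])
--                     if around_color == {"W"}:
--                         white_score += len(group)
--                     elif around_color == {"B"}:
--                         black_score += len(group)
--
--     return black_score, white_score
-- ===== SOURCE B (Python) =====
-- def count_chinese_score(board):
--     size = len(board)
--
--     def neighbours(p):
--         r, c = p
--         return [(r2, c2) for r2, c2 in ((r - 1, c), (r + 1, c), (r, c - 1), (r, c + 1))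
--                 if 0 <= r2 < size and 0 <= c2 < size]
--
--     def cell(p):
--         return board[p[0]][p[1]]
--
--     def fence_colours(start):
--         """colours fencing the empty region of start; region by whole-set saturation"""
--         region = {start}
--         while True:
--             bigger = region | {q for p in region for q in neighbours(p) if cell(q) == '.'}
--             if bigger == region:
--                 break
--             region = bigger
--         return {cell(q) for p in region for q in neighbours(p) if cell(q) != '.'}
--
--     black = sum(row[:size].count('B') for row in board)
--     white = sum(row[:size].count('W') for row in board)
--     empties = [(i, j) for i in range(size) for j in range(size) if board[i][j] == '.']
--     black += sum(1 for p in empties if fence_colours(p) == {'B'})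
--     white += sum(1 for p in empties if fence_colours(p) == {'W'})
--     return black, white
-- ===== Notes on version B (the rewrite author's own statement) =====
-- stated objective: alternative
-- what changed: B drops A's single visited-set scan entirely: stones are counted per row with row[:size].count, and each empty point is scored individually (no visited set, no per-component len(group) bookkeeping) by recomputing its region with a whole-set grow-until-fixpoint saturation instead of A's explicit DFS stack.
import Mathlib
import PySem

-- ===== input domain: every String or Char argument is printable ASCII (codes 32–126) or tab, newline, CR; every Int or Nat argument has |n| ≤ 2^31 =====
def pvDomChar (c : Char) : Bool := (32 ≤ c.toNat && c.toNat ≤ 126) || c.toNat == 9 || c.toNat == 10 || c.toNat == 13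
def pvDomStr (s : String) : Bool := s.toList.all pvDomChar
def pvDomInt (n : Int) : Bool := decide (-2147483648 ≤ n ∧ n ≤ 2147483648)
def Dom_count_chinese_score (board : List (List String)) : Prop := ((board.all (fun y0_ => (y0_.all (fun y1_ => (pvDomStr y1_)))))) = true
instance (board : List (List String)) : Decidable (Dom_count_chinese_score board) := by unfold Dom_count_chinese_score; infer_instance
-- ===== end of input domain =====

-- B counts stones per row with row[:size].count and scores each empty point individually by a
-- whole-set saturation of its region (no DFS stack, no visited set, no per-component size
-- bookkeeping); an alternative decomposition, not claimed faster.


-- ===== PORT A =====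
-- board[r][c]; the default "" is never reached on inputs satisfying Pre_ (all indexing is bounds-guarded)
def pvGrid (board : List (List String)) (r c : Int) : String :=
  PySem.List.pyGetD (PySem.List.pyGetD board r []) c ""

-- is_within_bounds(row, col)
def pvInB (size r c : Int) : Bool := decide (0 ≤ r ∧ r < size) && decide (0 ≤ c ∧ c < size)

-- the neighbour offsets [(-1,0),(1,0),(0,-1),(0,1)]
def pvDeltas : List (Int × Int) := [(-1, 0), (1, 0), (0, -1), (0, 1)]

-- finite universe of board positions (termination measures only; not part of the computation)
def pvUniv (size : Int) : Finset (Int × Int) :=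
  ((PySem.List.pyRange 0 size 1) ×ˢ (PySem.List.pyRange 0 size 1)).toFinset

theorem pvInB_iff_memUniv (size : Int) (p : Int × Int) :
    pvInB size p.1 p.2 = true ↔ p ∈ pvUniv size := by
  cases p
  simp [pvInB, pvUniv, List.mem_toFinset, PySem.List.mem_pyRange_one, and_assoc]

-- generic shape of A's neighbour-push loop ('for d in deltas: if ...: stack.append(...)', top of stack = head)
theorem pvMem_foldl_consIf {β γ : Type} (ds : List β) (g : β → Bool) (F : β → γ) :
    ∀ (init : List γ) (y : γ),
      (y ∈ ds.foldl (fun st d => if g d then F d :: st else st) init) ↔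
        (y ∈ init ∨ ∃ d ∈ ds, g d = true ∧ y = F d) := by
  induction ds with
  | nil => simp
  | cons d ds ih =>
      intro init y
      by_cases hg : g d = true
      · simp only [List.foldl_cons, hg, if_pos]
        rw [ih]
        constructor
        · rintro (h | h)
          · rcases List.mem_cons.mp h with h | h
            · exact Or.inr ⟨d, by simp, hg, h⟩
            · exact Or.inl h
          · rcases h with ⟨d', hd', hgd', rfl⟩
            exact Or.inr ⟨d', by simp [hd'], hgd', rfl⟩
        · rintro (h | ⟨d', hd', hgd', rfl⟩)
          · exact Or.inl (List.mem_cons_of_mem _ h)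
          · rcases List.mem_cons.mp hd' with rfl | hd'
            · exact Or.inl List.mem_cons_self
            · exact Or.inr ⟨d', hd', hgd', rfl⟩
      · simp only [List.foldl_cons, hg, if_neg, Bool.false_eq_true, not_false_iff]
        rw [ih]
        constructor
        · rintro (h | ⟨d', hd', hgd', rfl⟩)
          · exact Or.inl h
          · exact Or.inr ⟨d', by simp [hd'], hgd', rfl⟩
        · rintro (h | ⟨d', hd', hgd', rfl⟩)
          · exact Or.inl h
          · rcases List.mem_cons.mp hd' with rfl | hd'
            · exact absurd hgd' hg
            · exact Or.inr ⟨d', hd', hgd', rfl⟩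

theorem pvLength_foldl_consIf_le {β γ : Type} (ds : List β) (g : β → Bool) (F : β → γ) :
    ∀ (init : List γ),
      (ds.foldl (fun st d => if g d then F d :: st else st) init).length ≤ init.length + ds.length := by
  induction ds with
  | nil => simp
  | cons d ds ih =>
      intro init
      by_cases hg : g d = true
      · simp only [List.foldl_cons, hg, if_pos]
        have := ih (F d :: init)
        simp only [List.length_cons] at this ⊢
        omega
      · simp only [List.foldl_cons, hg, if_neg, Bool.false_eq_true, not_false_iff]
        have := ih init
        simp only [List.length_cons]
        omega

-- get_group's while loop: pop from the stack (head = Python's list end), skip if seen, else mark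
-- and push the unseen same-colour in-bounds neighbours
def pvDfs (board : List (List String)) (size : Int) (color : String)
    (connected : PySem.Set (Int × Int)) (stack : List (Int × Int)) : PySem.Set (Int × Int) :=
  match stack with
  | [] => connected
  | cur :: rest =>
      if connected.contains cur then
        pvDfs board size color connected rest
      else
        let connected' := connected.add cur
        let stack' := pvDeltas.foldl (fun st d =>
          if pvInB size (cur.1 + d.1) (cur.2 + d.2) &&
             (pvGrid board (cur.1 + d.1) (cur.2 + d.2) == color) &&
             !(connected'.contains (cur.1 + d.1, cur.2 + d.2))
          then (cur.1 + d.1, cur.2 + d.2) :: st else st) rest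
        pvDfs board size color connected' stack'
termination_by 5 * (((pvUniv size ∪ stack.toFinset) \ connected.toFinset).card) + stack.length
decreasing_by
  · have hsub : ((pvUniv size ∪ rest.toFinset) \ connected.toFinset)
        ⊆ ((pvUniv size ∪ (cur :: rest).toFinset) \ connected.toFinset) := by
      intro p hp
      rw [Finset.mem_sdiff, Finset.mem_union] at hp ⊢
      rcases hp with ⟨hl | hl, hr⟩
      · exact ⟨Or.inl hl, hr⟩
      · refine ⟨Or.inr ?_, hr⟩
        rw [List.mem_toFinset] at hl ⊢
        exact List.mem_cons_of_mem _ hl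
    have := Finset.card_le_card hsub
    simp only [List.length_cons]
    omega
  · rename_i hc
    have hcur_notin : cur ∉ connected := by
      intro h; exact hc ((PySem.Set.contains_iff connected cur).mpr h)
    have hcur_mem : cur ∈ ((pvUniv size ∪ (cur :: rest).toFinset) \ connected.toFinset) := by
      rw [Finset.mem_sdiff, Finset.mem_union]
      exact ⟨Or.inr (by simp), by simpa [List.mem_toFinset] using hcur_notin⟩
    have hsub : ((pvUniv size ∪ (pvDeltas.foldl (fun st d =>
          if pvInB size (cur.1 + d.1) (cur.2 + d.2) &&
             (pvGrid board (cur.1 + d.1) (cur.2 + d.2) == color) &&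
             !((connected.add cur).contains (cur.1 + d.1, cur.2 + d.2))
          then (cur.1 + d.1, cur.2 + d.2) :: st else st) rest).toFinset) \ (connected.add cur).toFinset)
        ⊆ (((pvUniv size ∪ (cur :: rest).toFinset) \ connected.toFinset)).erase cur := by
      intro p hp
      rw [Finset.mem_sdiff, Finset.mem_union] at hp
      rcases hp with ⟨hl, hr⟩
      rw [List.mem_toFinset] at hr
      have hpne : p ≠ cur := by
        rintro rfl
        exact hr ((PySem.Set.mem_add connected p p).mpr (Or.inr rfl))
      have hpnc : p ∉ connected := fun h => hr ((PySem.Set.mem_add connected cur p).mpr (Or.inl h))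
      rw [Finset.mem_erase, Finset.mem_sdiff, Finset.mem_union]
      refine ⟨hpne, ?_, by simpa [List.mem_toFinset] using hpnc⟩
      rcases hl with hl | hl
      · exact Or.inl hl
      · rw [List.mem_toFinset] at hl
        rw [pvMem_foldl_consIf] at hl
        rcases hl with hl | ⟨d, _, hg, rfl⟩
        · refine Or.inr ?_
          rw [List.mem_toFinset]
          exact List.mem_cons_of_mem _ hl
        · refine Or.inl ?_
          rw [Bool.and_assoc, Bool.and_eq_true] at hg
          exact (pvInB_iff_memUniv size _).mp hg.1
    have h1 := Finset.card_le_card hsub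
    have h2 := Finset.card_erase_of_mem hcur_mem
    have h3 := pvLength_foldl_consIf_le pvDeltas
      (fun d => pvInB size (cur.1 + d.1) (cur.2 + d.2) &&
             (pvGrid board (cur.1 + d.1) (cur.2 + d.2) == color) &&
             !((connected.add cur).contains (cur.1 + d.1, cur.2 + d.2)))
      (fun d => (cur.1 + d.1, cur.2 + d.2)) rest
    have hpos : 0 < ((pvUniv size ∪ (cur :: rest).toFinset) \ connected.toFinset).card :=
      Finset.card_pos.mpr ⟨cur, hcur_mem⟩
    simp only [dite_eq_ite, List.length_cons]
    rw [show pvDeltas.length = 4 from rfl] at h3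
    omega

-- get_group(row, col)
def pvGetGroup (board : List (List String)) (size row col : Int) : PySem.Set (Int × Int) :=
  pvDfs board size (pvGrid board row col) PySem.Set.empty [(row, col)]

-- body of A's double scan: state = (black_score, white_score, visited)
def pvAStep (board : List (List String)) (size : Int)
    (st : Int × Int × PySem.Set (Int × Int)) (c : Int × Int) : Int × Int × PySem.Set (Int × Int) :=
  if st.2.2.contains c then st
  else if pvGrid board c.1 c.2 == "B" then (st.1 + 1, st.2.1, st.2.2)
  else if pvGrid board c.1 c.2 == "W" then (st.1, st.2.1 + 1, st.2.2)
  else if pvGrid board c.1 c.2 == "." then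
    let group := pvGetGroup board size c.1 c.2
    let va := group.foldl (fun (va : PySem.Set (Int × Int) × PySem.Set String) p =>
      (va.1.add p,
       pvDeltas.foldl (fun a d =>
         if pvInB size (p.1 + d.1) (p.2 + d.2) &&
            !(pvGrid board (p.1 + d.1) (p.2 + d.2) == pvGrid board c.1 c.2)
         then a.add (pvGrid board (p.1 + d.1) (p.2 + d.2)) else a) va.2)) (st.2.2, PySem.Set.empty)
    if PySem.Set.equal va.2 (PySem.Set.ofList ["W"]) then (st.1, st.2.1 + group.len, va.1)
    else if PySem.Set.equal va.2 (PySem.Set.ofList ["B"]) then (st.1 + group.len, st.2.1, va.1)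
    else (st.1, st.2.1, va.1)
  else st

def count_chinese_score (board : List (List String)) : Int × Int :=
  let size : Int := board.length
  let st := (PySem.List.pyRange 0 size 1).foldl (fun st i =>
    (PySem.List.pyRange 0 size 1).foldl (fun st j => pvAStep board size st (i, j)) st)
    (0, 0, PySem.Set.empty)
  (st.1, st.2.1)

-- ===== PORT B =====
-- neighbours(p): the list of in-bounds 4-neighbours
def pvNbrs (size : Int) (p : Int × Int) : List (Int × Int) :=
  [(p.1 - 1, p.2), (p.1 + 1, p.2), (p.1, p.2 - 1), (p.1, p.2 + 1)].filter
    (fun q => decide (0 ≤ q.1 ∧ q.1 < size ∧ 0 ≤ q.2 ∧ q.2 < size))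

-- cell(p) = board[p[0]][p[1]]; the default "" is unreachable on inputs satisfying Pre_
def pvCell (board : List (List String)) (p : Int × Int) : String :=
  (PySem.List.pyGet? ((PySem.List.pyGet? board p.1).getD []) p.2).getD ""

-- needed by pvSatB's termination argument
theorem pvNbrs_mem_univ (size : Int) (p q : Int × Int) (h : q ∈ pvNbrs size p) :
    q ∈ pvUniv size := by
  simp only [pvNbrs, List.mem_filter, decide_eq_true_eq] at h
  apply (pvInB_iff_memUniv size q).mp
  simp only [pvInB, Bool.and_eq_true, decide_eq_true_eq]
  exact ⟨⟨h.2.1, h.2.2.1⟩, h.2.2.2.1, h.2.2.2.2⟩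

-- one growth pass: region | {q for p in region for q in neighbours(p) if cell(q) == '.'}
def pvGrowB (board : List (List String)) (size : Int)
    (region : PySem.Set (Int × Int)) : PySem.Set (Int × Int) :=
  PySem.Set.union region
    (PySem.Set.ofList ((region.flatMap (pvNbrs size)).filter (fun q => pvCell board q == ".")))

-- needed by pvSatB's termination argument
theorem mem_pvGrowB (board : List (List String)) (size : Int)
    (region : PySem.Set (Int × Int)) (y : Int × Int) :
    y ∈ pvGrowB board size region ↔
      y ∈ region ∨ ∃ p ∈ region, y ∈ pvNbrs size p ∧ pvCell board y = "." := by
  rw [pvGrowB, PySem.Set.mem_union, PySem.Set.mem_ofList, List.mem_filter, List.mem_flatMap]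
  constructor
  · rintro (h | ⟨⟨p, hp, hq⟩, hc⟩)
    · exact Or.inl h
    · exact Or.inr ⟨p, hp, hq, beq_iff_eq.mp hc⟩
  · rintro (h | ⟨p, hp, hq, hc⟩)
    · exact Or.inl h
    · exact Or.inr ⟨⟨p, hp, hq⟩, beq_iff_eq.mpr hc⟩

-- fence_colours' while loop: grow the region until it stops changing
def pvSatB (board : List (List String)) (size : Int)
    (region : PySem.Set (Int × Int)) : PySem.Set (Int × Int) :=
  if PySem.Set.equal (pvGrowB board size region) region then region
  else pvSatB board size (pvGrowB board size region)
termination_by ((pvUniv size) \ region.toFinset).card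
decreasing_by
  rename_i hne
  have hsup : ∀ y ∈ region, y ∈ pvGrowB board size region :=
    fun y hy => (mem_pvGrowB board size region y).mpr (Or.inl hy)
  have hx : ∃ x, x ∈ pvGrowB board size region ∧ x ∉ region ∧ x ∈ pvUniv size := by
    by_contra hno
    push Not at hno
    apply hne
    rw [PySem.Set.equal_iff]
    intro x
    constructor
    · intro hxg
      by_contra hxc
      rcases (mem_pvGrowB board size region x).mp hxg with h | ⟨p, _, hq, _⟩
      · exact hxc h
      · exact hno x hxg hxc (pvNbrs_mem_univ size p x hq)
    · exact hsup x
  rcases hx with ⟨x, hxg, hxc, hxu⟩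
  have hxmem : x ∈ (pvUniv size) \ region.toFinset := by
    rw [Finset.mem_sdiff, List.mem_toFinset]; exact ⟨hxu, hxc⟩
  apply Finset.card_lt_card
  rw [Finset.ssubset_iff_of_subset]
  · exact ⟨x, hxmem, by rw [Finset.mem_sdiff, List.mem_toFinset]; exact fun h => h.2 hxg⟩
  · intro p hp
    rw [Finset.mem_sdiff, List.mem_toFinset] at hp ⊢
    exact ⟨hp.1, fun h => hp.2 (hsup p h)⟩

-- fence_colours(start): the stone colours on the rim of start's saturated empty region
def pvFenceColours (board : List (List String)) (size : Int) (start : Int × Int) : PySem.Set String :=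
  let region := pvSatB board size (PySem.Set.ofList [start])
  PySem.Set.ofList
    (((region.flatMap (pvNbrs size)).filter (fun q => !(pvCell board q == "."))).map (pvCell board))

def count_chinese_score_alt (board : List (List String)) : Int × Int :=
  let size : Int := board.length
  let black : Int := (board.map (fun row =>
    ((PySem.List.count (PySem.List.slice row none (some size)) "B" : Nat) : Int))).sum
  let white : Int := (board.map (fun row =>
    ((PySem.List.count (PySem.List.slice row none (some size)) "W" : Nat) : Int))).sum
  let empties := (PySem.List.pyRange 0 size 1).flatMap (fun i =>
    ((PySem.List.pyRange 0 size 1).filter (fun j => pvCell board (i, j) == ".")).map (fun j => (i, j)))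
  (black + (empties.countP (fun p =>
      PySem.Set.equal (pvFenceColours board size p) (PySem.Set.ofList ["B"])) : Int),
   white + (empties.countP (fun p =>
      PySem.Set.equal (pvFenceColours board size p) (PySem.Set.ofList ["W"])) : Int))

-- ===== PRECONDITION & SPEC =====
-- Pre_ excludes exactly the ragged boards (some row shorter than the board is long) on which
-- Python A raises IndexError while scanning; B raises there too.
def Pre_count_chinese_score (board : List (List String)) : Prop :=
  ∀ row ∈ board, board.length ≤ row.length
instance (board : List (List String)) : Decidable (Pre_count_chinese_score board) := by
  unfold Pre_count_chinese_score; infer_instance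

def pvWitness_count_chinese_score : List (List String) := [[".", "B"], ["B", "."]]

def Spec_count_chinese_score (board : List (List String)) (out : Int × Int) : Prop := out = count_chinese_score_alt board
instance (board : List (List String)) (out : Int × Int) : Decidable (Spec_count_chinese_score board out) := by unfold Spec_count_chinese_score; infer_instance

-- ===== CLAIM (what is proved, stated in full; the proofs are below) =====
def Claim_equal_count_chinese_score : Prop := ∀ (board : List (List String)), Dom_count_chinese_score board → Pre_count_chinese_score board → Spec_count_chinese_score board (count_chinese_score board)

-- ===== LEMMAS AND PROOFS =====

-- ---- reachability through same-colour in-bounds neighbours ----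
def pvStepR (board : List (List String)) (size : Int) (color : String) (a b : Int × Int) : Prop :=
  (∃ d ∈ pvDeltas, b = (a.1 + d.1, a.2 + d.2)) ∧ pvInB size b.1 b.2 = true ∧
    pvGrid board b.1 b.2 = color

def pvReach (board : List (List String)) (size : Int) (color : String) :
    (Int × Int) → (Int × Int) → Prop :=
  Relation.ReflTransGen (pvStepR board size color)

-- ---- characterization of A's DFS ----
theorem pvGuard_iff (board : List (List String)) (size : Int) (color : String) (p y : Int × Int) :
    (∃ d ∈ pvDeltas,
      (pvInB size (p.1 + d.1) (p.2 + d.2) && (pvGrid board (p.1 + d.1) (p.2 + d.2) == color)) = true ∧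
      y = (p.1 + d.1, p.2 + d.2)) ↔ pvStepR board size color p y := by
  constructor
  · rintro ⟨d, hd, hg, rfl⟩
    rw [Bool.and_eq_true] at hg
    exact ⟨⟨d, hd, rfl⟩, hg.1, beq_iff_eq.mp hg.2⟩
  · rintro ⟨⟨d, hd, rfl⟩, h1, h2⟩
    exact ⟨d, hd, by rw [Bool.and_eq_true]; exact ⟨h1, beq_iff_eq.mpr h2⟩, rfl⟩

theorem pvDfs_supset (board : List (List String)) (size : Int) (color : String)
    (connected : PySem.Set (Int × Int)) (stack : List (Int × Int)) :
    ∀ x, (x ∈ connected ∨ x ∈ stack) → x ∈ pvDfs board size color connected stack := by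
  intro x
  induction connected, stack using pvDfs.induct board size color with
  | case1 connected =>
      rintro (h | h)
      · rw [pvDfs.eq_def]; exact h
      · cases h
  | case2 connected cur rest hc ih =>
      intro h
      rw [pvDfs.eq_def]
      simp only [hc, if_pos]
      apply ih
      rcases h with h | h
      · exact Or.inl h
      · rcases List.mem_cons.mp h with rfl | h
        · exact Or.inl ((PySem.Set.contains_iff connected x).mp hc)
        · exact Or.inr h
  | case3 connected cur rest hc connected2 stack2 ih =>
      intro h
      rw [pvDfs.eq_def]
      simp only [hc, if_neg, Bool.false_eq_true, not_false_iff]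
      apply ih
      rcases h with h | h
      · exact Or.inl ((PySem.Set.mem_add connected cur x).mpr (Or.inl h))
      · rcases List.mem_cons.mp h with rfl | h
        · exact Or.inl ((PySem.Set.mem_add connected x x).mpr (Or.inr rfl))
        · exact Or.inr ((pvMem_foldl_consIf _ _ _ _ _).mpr (Or.inl h))

theorem pvDfs_sound (board : List (List String)) (size : Int) (color : String)
    (P : (Int × Int) → Prop) (hP : ∀ a b, P a → pvStepR board size color a b → P b) :
    ∀ (connected : PySem.Set (Int × Int)) (stack : List (Int × Int)),
      (∀ v ∈ connected, P v) → (∀ s ∈ stack, P s) →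
      ∀ x ∈ pvDfs board size color connected stack, P x := by
  intro connected stack
  induction connected, stack using pvDfs.induct board size color with
  | case1 connected =>
      intro h1 _ x hx
      rw [pvDfs.eq_def] at hx
      exact h1 x hx
  | case2 connected cur rest hc ih =>
      intro h1 h2 x hx
      rw [pvDfs.eq_def] at hx
      simp only [hc, if_pos] at hx
      exact ih h1 (fun s hs => h2 s (List.mem_cons_of_mem _ hs)) x hx
  | case3 connected cur rest hc connected2 stack2 ih =>
      intro h1 h2 x hx
      rw [pvDfs.eq_def] at hx
      simp only [hc, if_neg, Bool.false_eq_true, not_false_iff] at hx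
      refine ih ?_ ?_ x hx
      · intro v hv
        rcases (PySem.Set.mem_add connected cur v).mp hv with hv | rfl
        · exact h1 v hv
        · exact h2 v List.mem_cons_self
      · intro s hs
        rcases (pvMem_foldl_consIf _ _ _ _ _).mp hs with hs | ⟨d, hd, hg, rfl⟩
        · exact h2 s (List.mem_cons_of_mem _ hs)
        · rw [Bool.and_eq_true] at hg
          refine hP cur _ (h2 cur List.mem_cons_self) ?_
          exact (pvGuard_iff board size color cur _).mp ⟨d, hd, hg.1, rfl⟩

theorem pvDfs_closed (board : List (List String)) (size : Int) (color : String)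
    (connected : PySem.Set (Int × Int)) (stack : List (Int × Int))
    (hinv : ∀ v ∈ connected, ∀ u, pvStepR board size color v u → u ∈ connected ∨ u ∈ stack) :
    ∀ v ∈ pvDfs board size color connected stack, ∀ u, pvStepR board size color v u →
      u ∈ pvDfs board size color connected stack := by
  revert hinv
  induction connected, stack using pvDfs.induct board size color with
  | case1 connected =>
      intro hinv v hv u hstep
      rw [pvDfs.eq_def] at hv ⊢
      rcases hinv v hv u hstep with h | h
      · exact h
      · cases h
  | case2 connected cur rest hc ih =>
      intro hinv v hv u hstep
      rw [pvDfs.eq_def] at hv ⊢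
      simp only [hc, if_pos] at hv ⊢
      refine ih ?_ v hv u hstep
      intro v' hv' u' hstep'
      rcases hinv v' hv' u' hstep' with h | h
      · exact Or.inl h
      · rcases List.mem_cons.mp h with rfl | h
        · exact Or.inl ((PySem.Set.contains_iff connected u').mp hc)
        · exact Or.inr h
  | case3 connected cur rest hc connected2 stack2 ih =>
      intro hinv v hv u hstep
      rw [pvDfs.eq_def] at hv ⊢
      simp only [hc, if_neg, Bool.false_eq_true, not_false_iff] at hv ⊢
      refine ih ?_ v hv u hstep
      intro v' hv' u' hstep'
      rcases (PySem.Set.mem_add connected cur v').mp hv' with hv'c | rfl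
      · rcases hinv v' hv'c u' hstep' with h | h
        · exact Or.inl ((PySem.Set.mem_add connected cur u').mpr (Or.inl h))
        · rcases List.mem_cons.mp h with rfl | h
          · exact Or.inl ((PySem.Set.mem_add connected u' u').mpr (Or.inr rfl))
          · exact Or.inr ((pvMem_foldl_consIf _ _ _ _ _).mpr (Or.inl h))
      · by_cases hin : u' ∈ PySem.Set.add connected v'
        · exact Or.inl hin
        · refine Or.inr ((pvMem_foldl_consIf _ _ _ _ _).mpr (Or.inr ?_))
          obtain ⟨d, hd, hg, hu⟩ := (pvGuard_iff board size color v' u').mpr hstep'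
          refine ⟨d, hd, ?_, hu⟩
          rw [Bool.and_eq_true]
          refine ⟨hg, ?_⟩
          rw [Bool.not_eq_true', Bool.eq_false_iff]
          intro hcontains
          rw [← hu] at hcontains
          exact hin ((PySem.Set.contains_iff _ u').mp hcontains)

theorem pvDfs_nodup (board : List (List String)) (size : Int) (color : String)
    (connected : PySem.Set (Int × Int)) (stack : List (Int × Int)) :
    connected.Nodup → (pvDfs board size color connected stack).Nodup := by
  induction connected, stack using pvDfs.induct board size color with
  | case1 connected => intro h; rw [pvDfs.eq_def]; exact h
  | case2 connected cur rest hc ih =>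
      intro h
      rw [pvDfs.eq_def]
      simp only [hc, if_pos]
      exact ih h
  | case3 connected cur rest hc connected2 stack2 ih =>
      intro h
      rw [pvDfs.eq_def]
      simp only [hc, if_neg, Bool.false_eq_true, not_false_iff]
      exact ih (PySem.Set.nodup_add connected cur h)

theorem mem_pvGetGroup (board : List (List String)) (size : Int) (c : Int × Int) :
    ∀ x, x ∈ pvGetGroup board size c.1 c.2 ↔
      pvReach board size (pvGrid board c.1 c.2) c x := by
  intro x
  constructor
  · intro hx
    refine pvDfs_sound board size _ (pvReach board size (pvGrid board c.1 c.2) c)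
      (fun a b ha hab => Relation.ReflTransGen.tail ha hab) _ _ ?_ ?_ x hx
    · intro v hv; cases hv
    · intro s hs
      rcases List.mem_cons.mp hs with rfl | hs
      · exact Relation.ReflTransGen.refl
      · cases hs
  · intro hr
    induction hr with
    | refl =>
        exact pvDfs_supset board size _ _ _ c (Or.inr List.mem_cons_self)
    | tail _ hstep ih =>
        refine pvDfs_closed board size _ _ _ ?_ _ ih _ hstep
        intro v hv; cases hv

-- ---- characterization of B's saturation ----
theorem pvCell_eq (board : List (List String)) (p : Int × Int) :
    pvCell board p = pvGrid board p.1 p.2 := rfl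

theorem mem_pvNbrs_iff (size : Int) (p q : Int × Int) :
    q ∈ pvNbrs size p ↔
      ((∃ d ∈ pvDeltas, q = (p.1 + d.1, p.2 + d.2)) ∧ pvInB size q.1 q.2 = true) := by
  simp only [pvNbrs, List.mem_filter, List.mem_cons, List.not_mem_nil, or_false,
    decide_eq_true_eq, pvDeltas, pvInB, Bool.and_eq_true]
  constructor
  · rintro ⟨hq, hb⟩
    refine ⟨?_, ⟨hb.1, hb.2.1⟩, ⟨hb.2.2.1, hb.2.2.2⟩⟩
    rcases hq with rfl | rfl | rfl | rfl
    · exact ⟨(-1, 0), by simp, by simp; omega⟩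
    · exact ⟨(1, 0), by simp, by simp⟩
    · exact ⟨(0, -1), by simp, by simp; omega⟩
    · exact ⟨(0, 1), by simp, by simp⟩
  · rintro ⟨⟨d, hd, rfl⟩, hb1, hb2⟩
    refine ⟨?_, hb1.1, hb1.2, hb2.1, hb2.2⟩
    rcases hd with rfl | rfl | rfl | rfl
    · exact Or.inl (by simp; omega)
    · exact Or.inr (Or.inl (by simp))
    · exact Or.inr (Or.inr (Or.inl (by simp; omega)))
    · exact Or.inr (Or.inr (Or.inr (by simp)))

theorem pvNbrs_step_iff (board : List (List String)) (size : Int) (p q : Int × Int) :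
    (q ∈ pvNbrs size p ∧ pvCell board q = ".") ↔ pvStepR board size "." p q := by
  rw [mem_pvNbrs_iff, pvCell_eq]
  unfold pvStepR
  tauto

theorem mem_pvGrowB_step (board : List (List String)) (size : Int)
    (region : PySem.Set (Int × Int)) (y : Int × Int) :
    y ∈ pvGrowB board size region ↔
      y ∈ region ∨ ∃ p ∈ region, pvStepR board size "." p y := by
  rw [mem_pvGrowB]
  constructor
  · rintro (h | ⟨p, hp, hq, hc⟩)
    · exact Or.inl h
    · exact Or.inr ⟨p, hp, (pvNbrs_step_iff board size p y).mp ⟨hq, hc⟩⟩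
  · rintro (h | ⟨p, hp, hstep⟩)
    · exact Or.inl h
    · obtain ⟨hq, hc⟩ := (pvNbrs_step_iff board size p y).mpr hstep
      exact Or.inr ⟨p, hp, hq, hc⟩

theorem pvSatB_supset (board : List (List String)) (size : Int)
    (region : PySem.Set (Int × Int)) :
    ∀ x ∈ region, x ∈ pvSatB board size region := by
  induction region using pvSatB.induct board size with
  | case1 region heq =>
      intro x hx
      rw [pvSatB.eq_def]
      simp only [heq, if_pos]
      exact hx
  | case2 region heq ih =>
      intro x hx
      rw [pvSatB.eq_def]
      simp only [heq, if_neg, Bool.false_eq_true, not_false_iff]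
      exact ih x ((mem_pvGrowB_step board size region x).mpr (Or.inl hx))

theorem pvSatB_sound (board : List (List String)) (size : Int)
    (P : (Int × Int) → Prop) (hP : ∀ a b, P a → pvStepR board size "." a b → P b) :
    ∀ (region : PySem.Set (Int × Int)), (∀ x ∈ region, P x) →
      ∀ x ∈ pvSatB board size region, P x := by
  intro region
  induction region using pvSatB.induct board size with
  | case1 region heq =>
      intro h x hx
      rw [pvSatB.eq_def] at hx
      simp only [heq, if_pos] at hx
      exact h x hx
  | case2 region heq ih =>
      intro h x hx
      rw [pvSatB.eq_def] at hx
      simp only [heq, if_neg, Bool.false_eq_true, not_false_iff] at hx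
      refine ih ?_ x hx
      intro y hy
      rcases (mem_pvGrowB_step board size region y).mp hy with hy | ⟨p, hp, hstep⟩
      · exact h y hy
      · exact hP p y (h p hp) hstep

theorem pvSatB_closed (board : List (List String)) (size : Int)
    (region : PySem.Set (Int × Int)) :
    ∀ x ∈ pvSatB board size region, ∀ y, pvStepR board size "." x y →
      y ∈ pvSatB board size region := by
  induction region using pvSatB.induct board size with
  | case1 region heq =>
      intro x hx y hstep
      rw [pvSatB.eq_def] at hx ⊢
      simp only [heq, if_pos] at hx ⊢
      have hy : y ∈ pvGrowB board size region :=
        (mem_pvGrowB_step board size region y).mpr (Or.inr ⟨x, hx, hstep⟩)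
      exact ((PySem.Set.equal_iff _ _).mp heq y).mp hy
  | case2 region heq ih =>
      intro x hx y hstep
      rw [pvSatB.eq_def] at hx ⊢
      simp only [heq, if_neg, Bool.false_eq_true, not_false_iff] at hx ⊢
      exact ih x hx y hstep

theorem mem_pvRegionB (board : List (List String)) (size : Int) (c : Int × Int) :
    ∀ x, x ∈ pvSatB board size (PySem.Set.ofList [c]) ↔ pvReach board size "." c x := by
  intro x
  constructor
  · intro hx
    refine pvSatB_sound board size (pvReach board size "." c)
      (fun a b ha hab => Relation.ReflTransGen.tail ha hab) _ ?_ x hx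
    intro y hy
    rcases List.mem_singleton.mp ((PySem.Set.mem_ofList [c] y).mp hy) with rfl
    exact Relation.ReflTransGen.refl
  · intro hr
    induction hr with
    | refl =>
        exact pvSatB_supset board size _ c
          ((PySem.Set.mem_ofList [c] c).mpr (List.mem_singleton.mpr rfl))
    | tail _ hstep ih =>
        exact pvSatB_closed board size _ _ ih _ hstep

-- ---- the empty-colour relation: symmetry and transport ----
def pvDotted (board : List (List String)) (size : Int) (p : Int × Int) : Prop :=
  pvInB size p.1 p.2 = true ∧ pvGrid board p.1 p.2 = "."

theorem pvReach_dotted (board : List (List String)) (size : Int) {a b : Int × Int}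
    (ha : pvDotted board size a) (h : pvReach board size "." a b) : pvDotted board size b := by
  induction h with
  | refl => exact ha
  | tail _ hstep _ => exact ⟨hstep.2.1, hstep.2.2⟩

theorem pvStepR_symm (board : List (List String)) (size : Int) {a b : Int × Int}
    (ha : pvDotted board size a) (h : pvStepR board size "." a b) :
    pvStepR board size "." b a := by
  obtain ⟨⟨d, hd, rfl⟩, _, _⟩ := h
  refine ⟨?_, ha.1, ha.2⟩
  simp only [pvDeltas, List.mem_cons, List.not_mem_nil, or_false] at hd
  obtain ⟨a1, a2⟩ := a
  rcases hd with rfl | rfl | rfl | rfl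
  · exact ⟨(1, 0), by simp [pvDeltas], by simp⟩
  · exact ⟨(-1, 0), by simp [pvDeltas], by simp⟩
  · exact ⟨(0, 1), by simp [pvDeltas], by simp⟩
  · exact ⟨(0, -1), by simp [pvDeltas], by simp⟩

theorem pvReach_symm (board : List (List String)) (size : Int) {a b : Int × Int}
    (ha : pvDotted board size a) (h : pvReach board size "." a b) :
    pvReach board size "." b a := by
  induction h with
  | refl => exact Relation.ReflTransGen.refl
  | tail h1 hstep ih =>
      have hd' := pvReach_dotted board size ha h1
      exact Relation.ReflTransGen.head (pvStepR_symm board size hd' hstep) ih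

theorem pvReach_congr (board : List (List String)) (size : Int) {c p : Int × Int}
    (hc : pvDotted board size c) (h : pvReach board size "." c p) :
    ∀ x, pvReach board size "." p x ↔ pvReach board size "." c x := by
  intro x
  constructor
  · intro hpx
    exact Relation.ReflTransGen.trans h hpx
  · intro hcx
    exact Relation.ReflTransGen.trans (pvReach_symm board size hc h) hcx

-- ---- border colours of an empty region, and who owns it ----
def pvBorder (board : List (List String)) (size : Int) (c : Int × Int) (s : String) : Prop :=
  ∃ p, pvReach board size "." c p ∧ ∃ d ∈ pvDeltas,
    pvInB size (p.1 + d.1) (p.2 + d.2) = true ∧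
    ¬ pvGrid board (p.1 + d.1) (p.2 + d.2) = "." ∧
    s = pvGrid board (p.1 + d.1) (p.2 + d.2)

def pvQual (board : List (List String)) (size : Int) (c : Int × Int) (col : String) : Prop :=
  ∀ s, pvBorder board size c s ↔ s = col

theorem pvQual_congr (board : List (List String)) (size : Int) {c p : Int × Int}
    (hc : pvDotted board size c) (h : pvReach board size "." c p) (col : String) :
    (pvQual board size p col ↔ pvQual board size c col) := by
  have hb : ∀ s, pvBorder board size p s ↔ pvBorder board size c s := by
    intro s
    unfold pvBorder
    constructor
    · rintro ⟨q, hq, hrest⟩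
      exact ⟨q, (pvReach_congr board size hc h q).mp hq, hrest⟩
    · rintro ⟨q, hq, hrest⟩
      exact ⟨q, (pvReach_congr board size hc h q).mpr hq, hrest⟩
  unfold pvQual
  constructor
  · intro hq s; rw [← hb s]; exact hq s
  · intro hq s; rw [hb s]; exact hq s

-- B's fence set holds exactly the border colours
theorem mem_pvFenceColours (board : List (List String)) (size : Int) (c : Int × Int) (s : String) :
    s ∈ pvFenceColours board size c ↔ pvBorder board size c s := by
  rw [pvFenceColours]
  rw [PySem.Set.mem_ofList, List.mem_map]
  constructor
  · rintro ⟨q, hq, rfl⟩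
    rw [List.mem_filter, List.mem_flatMap] at hq
    obtain ⟨⟨p, hp, hqn⟩, hne⟩ := hq
    obtain ⟨⟨d, hd, rfl⟩, hb⟩ := (mem_pvNbrs_iff size p _).mp hqn
    rw [Bool.not_eq_true', beq_eq_false_iff_ne] at hne
    rw [pvCell_eq] at hne ⊢
    exact ⟨p, (mem_pvRegionB board size c p).mp hp, d, hd, hb, hne, rfl⟩
  · rintro ⟨p, hp, d, hd, hb, hne, rfl⟩
    refine ⟨(p.1 + d.1, p.2 + d.2), ?_, (pvCell_eq board _).symm ▸ rfl⟩
    rw [List.mem_filter, List.mem_flatMap]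
    refine ⟨⟨p, (mem_pvRegionB board size c p).mpr hp, ?_⟩, ?_⟩
    · exact (mem_pvNbrs_iff size p _).mpr ⟨⟨d, hd, rfl⟩, hb⟩
    · rw [Bool.not_eq_true', beq_eq_false_iff_ne, pvCell_eq]
      exact hne

-- ---- counting devices ----
theorem pvMem_filterC {α : Type} (q : α → Prop) (s : Finset α) (a : α) :
    (a ∈ @Finset.filter _ q (fun _ => Classical.propDecidable _) s) ↔ (a ∈ s ∧ q a) :=
  @Finset.mem_filter _ q (fun _ => Classical.propDecidable _) s a

noncomputable def pvCompF (board : List (List String)) (size : Int) (c : Int × Int) :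
    Finset (Int × Int) :=
  @Finset.filter _ (fun p => pvReach board size "." c p)
    (fun _ => Classical.propDecidable _) (pvUniv size)

noncomputable def pvTouched (board : List (List String)) (size : Int) (col : String)
    (P : List (Int × Int)) : Finset (Int × Int) :=
  @Finset.filter _
    (fun p => pvGrid board p.1 p.2 = "." ∧ pvQual board size p col ∧
      ∃ c ∈ P, pvReach board size "." p c)
    (fun _ => Classical.propDecidable _) (pvUniv size)

def pvStones (board : List (List String)) (col : String) (P : List (Int × Int)) : Int :=
  (P.map (fun c => if pvGrid board c.1 c.2 = col then (1 : Int) else 0)).sum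

def pvDotQual (board : List (List String)) (size : Int) (col : String) (c : Int × Int) : Prop :=
  pvGrid board c.1 c.2 = "." ∧ pvQual board size c col

-- ---- the generic 'does this empty region belong to col' test ----
theorem pvEqualSingleton (board : List (List String)) (size : Int) (c : Int × Int)
    (fences : PySem.Set String) (col : String)
    (hf : ∀ s, s ∈ fences ↔ pvBorder board size c s) :
    (PySem.Set.equal fences (PySem.Set.ofList [col]) = true) ↔ pvQual board size c col := by
  rw [PySem.Set.equal_iff]
  constructor
  · intro h s
    rw [← hf s, h s, PySem.Set.mem_ofList, List.mem_singleton]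
  · intro h s
    rw [hf s, PySem.Set.mem_ofList, List.mem_singleton]
    exact h s

theorem pvQual_excl (board : List (List String)) (size : Int) (c : Int × Int)
    (hB : pvQual board size c "B") (hW : pvQual board size c "W") : False := by
  have h1 : pvBorder board size c "B" := (hB "B").mpr rfl
  have h2 : ("B" : String) = "W" := (hW "B").mp h1
  exact absurd h2 (by decide)

-- ---- A's fence loop ----
theorem pvMem_foldl_foldl_addIf {β γ : Type} [BEq γ] [LawfulBEq γ]
    (l : List (Int × Int)) (ds : List β)
    (g : (Int × Int) → β → Bool) (F : (Int × Int) → β → γ) :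
    ∀ (init : PySem.Set γ) (y : γ),
      (y ∈ l.foldl (fun a p => ds.foldl (fun a d => if g p d then (PySem.Set.add a (F p d)) else a) a) init) ↔
        (y ∈ init ∨ ∃ p ∈ l, ∃ d ∈ ds, g p d = true ∧ y = F p d) := by
  have inner : ∀ (p : Int × Int) (ds' : List β) (init : PySem.Set γ) (y : γ),
      (y ∈ ds'.foldl (fun a d => if g p d then (PySem.Set.add a (F p d)) else a) init) ↔
        (y ∈ init ∨ ∃ d ∈ ds', g p d = true ∧ y = F p d) := by
    intro p ds'
    induction ds' with
    | nil => simp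
    | cons d ds' ih =>
        intro init y
        by_cases hg : g p d = true
        · simp only [List.foldl_cons, hg, if_pos]
          rw [ih]
          rw [PySem.Set.mem_add]
          constructor
          · rintro (⟨h | h⟩ | h)
            · exact Or.inl h
            · exact Or.inr ⟨d, by simp, hg, h⟩
            · rcases h with ⟨d', hd', hgd', rfl⟩
              exact Or.inr ⟨d', by simp [hd'], hgd', rfl⟩
          · rintro (h | ⟨d', hd', hgd', rfl⟩)
            · exact Or.inl (Or.inl h)
            · rcases List.mem_cons.mp hd' with rfl | hd'
              · exact Or.inl (Or.inr rfl)
              · exact Or.inr ⟨d', hd', hgd', rfl⟩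
        · simp only [List.foldl_cons, hg, if_neg, Bool.false_eq_true, not_false_iff]
          rw [ih]
          constructor
          · rintro (h | ⟨d', hd', hgd', rfl⟩)
            · exact Or.inl h
            · exact Or.inr ⟨d', by simp [hd'], hgd', rfl⟩
          · rintro (h | ⟨d', hd', hgd', rfl⟩)
            · exact Or.inl h
            · rcases List.mem_cons.mp hd' with rfl | hd'
              · exact absurd hgd' hg
              · exact Or.inr ⟨d', hd', hgd', rfl⟩
  induction l with
  | nil => simp
  | cons p l ih =>
      intro init y
      simp only [List.foldl_cons]
      rw [ih, inner]
      constructor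
      · rintro (⟨h | h⟩ | h)
        · exact Or.inl h
        · rcases h with ⟨d, hd, hgd, rfl⟩
          exact Or.inr ⟨p, by simp, d, hd, hgd, rfl⟩
        · rcases h with ⟨p', hp', d, hd, hgd, rfl⟩
          exact Or.inr ⟨p', by simp [hp'], d, hd, hgd, rfl⟩
      · rintro (h | ⟨p', hp', d, hd, hgd, rfl⟩)
        · exact Or.inl (Or.inl h)
        · rcases List.mem_cons.mp hp' with rfl | hp'
          · exact Or.inl (Or.inr ⟨d, hd, hgd, rfl⟩)
          · exact Or.inr ⟨p', hp', d, hd, hgd, rfl⟩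

theorem pvFences_mem (board : List (List String)) (size : Int) (c : Int × Int)
    (reg : List (Int × Int)) (hreg : ∀ x, x ∈ reg ↔ pvReach board size "." c x) :
    ∀ s, (s ∈ reg.foldl (fun f p =>
      pvDeltas.foldl (fun f d =>
        if pvInB size (p.1 + d.1) (p.2 + d.2) && !(pvGrid board (p.1 + d.1) (p.2 + d.2) == ".")
        then PySem.Set.add f (pvGrid board (p.1 + d.1) (p.2 + d.2)) else f) f) PySem.Set.empty) ↔
      pvBorder board size c s := by
  intro s
  rw [pvMem_foldl_foldl_addIf]
  constructor
  · rintro (h | ⟨p, hp, d, hd, hg, rfl⟩)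
    · cases h
    · rw [Bool.and_eq_true, Bool.not_eq_true'] at hg
      obtain ⟨hg1, hg2⟩ := hg
      have hne : ¬ pvGrid board (p.1 + d.1) (p.2 + d.2) = "." := by
        intro hcontra
        rw [hcontra] at hg2
        simp at hg2
      exact ⟨p, (hreg p).mp hp, d, hd, hg1, hne, rfl⟩
  · rintro ⟨p, hp, d, hd, hinb, hne, rfl⟩
    refine Or.inr ⟨p, (hreg p).mpr hp, d, hd, ?_, rfl⟩
    rw [Bool.and_eq_true, Bool.not_eq_true']
    refine ⟨hinb, ?_⟩
    rw [beq_eq_false_iff_ne]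
    exact hne

-- ---- A's scan invariant ----
def pvAInv (board : List (List String)) (size : Int) (P : List (Int × Int))
    (st : Int × Int × PySem.Set (Int × Int)) : Prop :=
  (∀ x, x ∈ st.2.2 ↔ ∃ c ∈ P, pvDotted board size c ∧ pvReach board size "." c x) ∧
  st.1 = pvStones board "B" P + ((pvTouched board size "B" P).card : Int) ∧
  st.2.1 = pvStones board "W" P + ((pvTouched board size "W" P).card : Int)

theorem pvStones_append (board : List (List String)) (col : String)
    (P : List (Int × Int)) (c : Int × Int) :
    pvStones board col (P ++ [c]) =
      pvStones board col P + (if pvGrid board c.1 c.2 = col then (1 : Int) else 0) := by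
  unfold pvStones
  rw [List.map_append, List.sum_append]
  simp

theorem pvReach_last (board : List (List String)) (size : Int) {p c : Int × Int}
    (h : pvReach board size "." p c) :
    c = p ∨ (pvInB size c.1 c.2 = true ∧ pvGrid board c.1 c.2 = ".") := by
  rcases Relation.ReflTransGen.cases_tail h with heq | ⟨mid, _, hstep⟩
  · exact Or.inl heq
  · exact Or.inr ⟨hstep.2.1, hstep.2.2⟩

theorem pvMem_foldl_add {γ : Type} [BEq γ] [LawfulBEq γ] (l : List γ) :
    ∀ (init : PySem.Set γ) (y : γ),
      (y ∈ l.foldl (fun s x => PySem.Set.add s x) init) ↔ (y ∈ init ∨ y ∈ l) := by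
  induction l with
  | nil => intro init y; simp
  | cons x l ih =>
      intro init y
      rw [List.foldl_cons, ih, PySem.Set.mem_add]
      constructor
      · rintro ((h | rfl) | h)
        · exact Or.inl h
        · exact Or.inr List.mem_cons_self
        · exact Or.inr (List.mem_cons_of_mem _ h)
      · rintro (h | h)
        · exact Or.inl (Or.inl h)
        · rcases List.mem_cons.mp h with rfl | h
          · exact Or.inl (Or.inr rfl)
          · exact Or.inr h

theorem pvVA_proj (board : List (List String)) (size : Int) (cc : String)
    (group : List (Int × Int)) :
    ∀ (v : PySem.Set (Int × Int)) (a : PySem.Set String),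
      (group.foldl (fun (va : PySem.Set (Int × Int) × PySem.Set String) p =>
        (va.1.add p,
         pvDeltas.foldl (fun a d =>
           if pvInB size (p.1 + d.1) (p.2 + d.2) && !(pvGrid board (p.1 + d.1) (p.2 + d.2) == cc)
           then a.add (pvGrid board (p.1 + d.1) (p.2 + d.2)) else a) va.2)) (v, a)) =
      (group.foldl (fun v p => v.add p) v,
       group.foldl (fun a p => pvDeltas.foldl (fun a d =>
           if pvInB size (p.1 + d.1) (p.2 + d.2) && !(pvGrid board (p.1 + d.1) (p.2 + d.2) == cc)
           then a.add (pvGrid board (p.1 + d.1) (p.2 + d.2)) else a) a) a) := by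
  induction group with
  | nil => intro v a; rfl
  | cons p group ih =>
      intro v a
      simp only [List.foldl_cons]
      exact ih _ _

theorem pvTouched_append_covered (board : List (List String)) (size : Int) (col : String)
    (P : List (Int × Int)) (c : Int × Int)
    (h : ∀ p, p ∈ pvUniv size → pvGrid board p.1 p.2 = "." → pvReach board size "." p c →
      ∃ c' ∈ P, pvReach board size "." p c') :
    pvTouched board size col (P ++ [c]) = pvTouched board size col P := by
  apply Finset.ext
  intro p
  unfold pvTouched
  rw [pvMem_filterC, pvMem_filterC]
  constructor
  · rintro ⟨hu, hg, hq, c', hc', hr⟩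
    rcases List.mem_append.mp hc' with hc' | hc'
    · exact ⟨hu, hg, hq, c', hc', hr⟩
    · rcases List.mem_singleton.mp hc' with rfl
      obtain ⟨c'', hc'', hr''⟩ := h p hu hg hr
      exact ⟨hu, hg, hq, c'', hc'', hr''⟩
  · rintro ⟨hu, hg, hq, c', hc', hr⟩
    exact ⟨hu, hg, hq, c', List.mem_append.mpr (Or.inl hc'), hr⟩

theorem pvTouched_append_new (board : List (List String)) (size : Int) (col : String)
    (P : List (Int × Int)) (c : Int × Int) (hcd : pvDotted board size c)
    (hnv : ∀ d ∈ P, pvDotted board size d → ¬ pvReach board size "." d c) :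
    ((pvTouched board size col (P ++ [c])).card : Int) =
      ((pvTouched board size col P).card : Int) +
      (@ite Int (pvQual board size c col) (Classical.propDecidable _) ((pvCompF board size c).card : Int) 0) := by
  by_cases hq : pvQual board size c col
  · rw [if_pos hq]
    have hU : pvTouched board size col (P ++ [c]) =
        pvTouched board size col P ∪ pvCompF board size c := by
      apply Finset.ext
      intro p
      rw [Finset.mem_union]
      unfold pvTouched pvCompF
      rw [pvMem_filterC, pvMem_filterC, pvMem_filterC]
      constructor
      · rintro ⟨hu, hg, hqp, c', hc', hr⟩
        rcases List.mem_append.mp hc' with hc' | hc'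
        · exact Or.inl ⟨hu, hg, hqp, c', hc', hr⟩
        · rcases List.mem_singleton.mp hc' with rfl
          exact Or.inr ⟨hu, pvReach_symm board size ⟨(pvInB_iff_memUniv size p).mpr hu, hg⟩ hr⟩
      · rintro (⟨hu, hg, hqp, c', hc', hr⟩ | ⟨hu, hr⟩)
        · exact ⟨hu, hg, hqp, c', List.mem_append.mpr (Or.inl hc'), hr⟩
        · have hpd := pvReach_dotted board size hcd hr
          have hqp : pvQual board size p col := (pvQual_congr board size hcd hr col).mpr hq
          exact ⟨hu, hpd.2, hqp, c, List.mem_append.mpr (Or.inr List.mem_cons_self),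
            pvReach_symm board size hcd hr⟩
    have hdisj : Disjoint (pvTouched board size col P) (pvCompF board size c) := by
      rw [Finset.disjoint_left]
      intro p hp hpc
      unfold pvTouched at hp
      unfold pvCompF at hpc
      rw [pvMem_filterC] at hp hpc
      obtain ⟨hu, hg, hqp, c', hc', hr⟩ := hp
      obtain ⟨_, hrcp⟩ := hpc
      have hpd : pvDotted board size p := ⟨(pvInB_iff_memUniv size p).mpr hu, hg⟩
      have hcd' : pvDotted board size c' := pvReach_dotted board size hpd hr
      have hrc'p : pvReach board size "." c' p := pvReach_symm board size hpd hr
      have hrc'c : pvReach board size "." c' c :=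
        Relation.ReflTransGen.trans hrc'p (pvReach_symm board size hcd hrcp)
      exact hnv c' hc' hcd' hrc'c
    rw [hU, Finset.card_union_of_disjoint hdisj]
    push_cast
    ring
  · rw [if_neg hq]
    have hT : pvTouched board size col (P ++ [c]) = pvTouched board size col P := by
      apply Finset.ext
      intro p
      unfold pvTouched
      rw [pvMem_filterC, pvMem_filterC]
      constructor
      · rintro ⟨hu, hg, hqp, c', hc', hr⟩
        rcases List.mem_append.mp hc' with hc' | hc'
        · exact ⟨hu, hg, hqp, c', hc', hr⟩
        · have hceq := List.mem_singleton.mp hc'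
          rw [hceq] at hr
          have hpd : pvDotted board size p := ⟨(pvInB_iff_memUniv size p).mpr hu, hg⟩
          have hrcp : pvReach board size "." c p := pvReach_symm board size hpd hr
          exact absurd ((pvQual_congr board size hcd hrcp col).mp hqp) hq
      · rintro ⟨hu, hg, hqp, c', hc', hr⟩
        exact ⟨hu, hg, hqp, c', List.mem_append.mpr (Or.inl hc'), hr⟩
    rw [hT]
    ring

theorem pvAStep_inv (board : List (List String)) (size : Int) (P : List (Int × Int))
    (st : Int × Int × PySem.Set (Int × Int)) (c : Int × Int)
    (hc : c ∈ pvUniv size) (h : pvAInv board size P st) :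
    pvAInv board size (P ++ [c]) (pvAStep board size st c) := by
  obtain ⟨hvis, hb, hw⟩ := h
  have hcin : pvInB size c.1 c.2 = true := (pvInB_iff_memUniv size c).mpr hc
  unfold pvAStep
  by_cases hin : st.2.2.contains c = true
  · rw [if_pos hin]
    obtain ⟨d0, hd0P, hd0d, hd0c⟩ := (hvis c).mp ((PySem.Set.contains_iff _ c).mp hin)
    have hcd : pvDotted board size c := pvReach_dotted board size hd0d hd0c
    have hcov : ∀ p, p ∈ pvUniv size → pvGrid board p.1 p.2 = "." →
        pvReach board size "." p c → ∃ c' ∈ P, pvReach board size "." p c' :=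
      fun p _ _ hr => ⟨d0, hd0P,
        Relation.ReflTransGen.trans hr (pvReach_symm board size hd0d hd0c)⟩
    refine ⟨?_, ?_, ?_⟩
    · intro x
      rw [hvis x]
      constructor
      · rintro ⟨c', hc', hcd', hr⟩
        exact ⟨c', List.mem_append.mpr (Or.inl hc'), hcd', hr⟩
      · rintro ⟨c', hc', hcd', hr⟩
        rcases List.mem_append.mp hc' with hc' | hc'
        · exact ⟨c', hc', hcd', hr⟩
        · rcases List.mem_singleton.mp hc' with rfl
          exact ⟨d0, hd0P, hd0d, Relation.ReflTransGen.trans hd0c hr⟩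
    · rw [pvStones_append, pvTouched_append_covered board size "B" P c hcov,
        if_neg (fun hh : _ = _ => by rw [hcd.2] at hh; exact absurd hh (by decide))]
      rw [hb]; ring
    · rw [pvStones_append, pvTouched_append_covered board size "W" P c hcov,
        if_neg (fun hh : _ = _ => by rw [hcd.2] at hh; exact absurd hh (by decide))]
      rw [hw]; ring
  · rw [if_neg hin]
    have hnv : ∀ d ∈ P, pvDotted board size d → ¬ pvReach board size "." d c :=
      fun d hd hdd hr => hin ((PySem.Set.contains_iff _ c).mpr ((hvis c).mpr ⟨d, hd, hdd, hr⟩))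
    by_cases hgB : pvGrid board c.1 c.2 = "B"
    · rw [if_pos (beq_iff_eq.mpr hgB)]
      have hcov : ∀ p, p ∈ pvUniv size → pvGrid board p.1 p.2 = "." →
          pvReach board size "." p c → ∃ c' ∈ P, pvReach board size "." p c' := by
        intro p _ hg hr
        rcases pvReach_last board size hr with heq | hlast
        · rw [← heq] at hg; rw [hg] at hgB; exact absurd hgB (by decide)
        · rw [hlast.2] at hgB; exact absurd hgB (by decide)
      refine ⟨?_, ?_, ?_⟩
      · intro x
        rw [hvis x]
        constructor
        · rintro ⟨c', hc', hcd', hr⟩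
          exact ⟨c', List.mem_append.mpr (Or.inl hc'), hcd', hr⟩
        · rintro ⟨c', hc', hcd', hr⟩
          rcases List.mem_append.mp hc' with hc' | hc'
          · exact ⟨c', hc', hcd', hr⟩
          · rcases List.mem_singleton.mp hc' with rfl
            rw [hcd'.2] at hgB; exact absurd hgB (by decide)
      · rw [pvStones_append, pvTouched_append_covered board size "B" P c hcov, if_pos hgB]
        rw [hb]; ring
      · rw [pvStones_append, pvTouched_append_covered board size "W" P c hcov,
          if_neg (fun hh : _ = _ => by rw [hgB] at hh; exact absurd hh (by decide))]
        rw [hw]; ring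
    · rw [if_neg (fun hbq => hgB (beq_iff_eq.mp hbq))]
      by_cases hgW : pvGrid board c.1 c.2 = "W"
      · rw [if_pos (beq_iff_eq.mpr hgW)]
        have hcov : ∀ p, p ∈ pvUniv size → pvGrid board p.1 p.2 = "." →
            pvReach board size "." p c → ∃ c' ∈ P, pvReach board size "." p c' := by
          intro p _ hg hr
          rcases pvReach_last board size hr with heq | hlast
          · rw [← heq] at hg; rw [hg] at hgW; exact absurd hgW (by decide)
          · rw [hlast.2] at hgW; exact absurd hgW (by decide)
        refine ⟨?_, ?_, ?_⟩
        · intro x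
          rw [hvis x]
          constructor
          · rintro ⟨c', hc', hcd', hr⟩
            exact ⟨c', List.mem_append.mpr (Or.inl hc'), hcd', hr⟩
          · rintro ⟨c', hc', hcd', hr⟩
            rcases List.mem_append.mp hc' with hc' | hc'
            · exact ⟨c', hc', hcd', hr⟩
            · rcases List.mem_singleton.mp hc' with rfl
              rw [hcd'.2] at hgW; exact absurd hgW (by decide)
        · rw [pvStones_append, pvTouched_append_covered board size "B" P c hcov,
            if_neg (fun hh : _ = _ => by rw [hgW] at hh; exact absurd hh (by decide))]
          rw [hb]; ring
        · rw [pvStones_append, pvTouched_append_covered board size "W" P c hcov, if_pos hgW]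
          rw [hw]; ring
      · rw [if_neg (fun hbq => hgW (beq_iff_eq.mp hbq))]
        by_cases hgd : pvGrid board c.1 c.2 = "."
        · rw [if_pos (beq_iff_eq.mpr hgd)]
          have hcd : pvDotted board size c := ⟨hcin, hgd⟩
          simp only [pvVA_proj]
          have hgm : ∀ x, x ∈ pvGetGroup board size c.1 c.2 ↔
              pvReach board size "." c x := by
            intro x
            rw [mem_pvGetGroup board size c x, hgd]
          have hfm : ∀ s,
              (s ∈ (pvGetGroup board size c.1 c.2).foldl (fun a p =>
                pvDeltas.foldl (fun a d =>
                  if pvInB size (p.1 + d.1) (p.2 + d.2) &&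
                     !(pvGrid board (p.1 + d.1) (p.2 + d.2) == pvGrid board c.1 c.2)
                  then a.add (pvGrid board (p.1 + d.1) (p.2 + d.2)) else a) a)
                PySem.Set.empty) ↔ pvBorder board size c s := by
            rw [hgd]
            exact pvFences_mem board size c (pvGetGroup board size c.1 c.2) hgm
          have hvchar : ∀ x,
              (x ∈ (pvGetGroup board size c.1 c.2).foldl (fun v p => v.add p) st.2.2) ↔
              ∃ c' ∈ P ++ [c], pvDotted board size c' ∧ pvReach board size "." c' x := by
            intro x
            rw [pvMem_foldl_add, hvis x, hgm x]
            constructor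
            · rintro (⟨c', hc', hcd', hr⟩ | hr)
              · exact ⟨c', List.mem_append.mpr (Or.inl hc'), hcd', hr⟩
              · exact ⟨c, List.mem_append.mpr (Or.inr List.mem_cons_self), hcd, hr⟩
            · rintro ⟨c', hc', hcd', hr⟩
              rcases List.mem_append.mp hc' with hc' | hc'
              · exact Or.inl ⟨c', hc', hcd', hr⟩
              · rcases List.mem_singleton.mp hc' with rfl
                exact Or.inr hr
          have hnodup : (pvGetGroup board size c.1 c.2).Nodup :=
            pvDfs_nodup board size _ _ _ List.nodup_nil
          have hfin : (pvGetGroup board size c.1 c.2).toFinset = pvCompF board size c := by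
            apply Finset.ext
            intro x
            rw [List.mem_toFinset]
            unfold pvCompF
            rw [pvMem_filterC]
            constructor
            · intro hx
              have hr := (hgm x).mp hx
              rcases pvReach_last board size hr with heq | hlast
              · rw [heq]; exact ⟨hc, heq ▸ hr⟩
              · exact ⟨(pvInB_iff_memUniv size x).mp hlast.1, hr⟩
            · rintro ⟨_, hr⟩
              exact (hgm x).mpr hr
          have hlen : PySem.Set.len (pvGetGroup board size c.1 c.2) =
              ((pvCompF board size c).card : Int) := by
            rw [PySem.Set.len_eq, ← hfin, List.toFinset_card_of_nodup hnodup]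
          by_cases hqW : pvQual board size c "W"
          · rw [if_pos ((pvEqualSingleton board size c _ "W" hfm).mpr hqW)]
            refine ⟨hvchar, ?_, ?_⟩
            · rw [pvStones_append, pvTouched_append_new board size "B" P c hcd hnv,
                if_neg (fun hh : _ = _ => by rw [hgd] at hh; exact absurd hh (by decide)),
                if_neg (fun hqB => pvQual_excl board size c hqB hqW)]
              rw [hb]; ring
            · rw [pvStones_append, pvTouched_append_new board size "W" P c hcd hnv,
                if_neg (fun hh : _ = _ => by rw [hgd] at hh; exact absurd hh (by decide)),
                if_pos hqW]
              rw [hw, hlen]; ring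
          · rw [if_neg (fun hbq => hqW ((pvEqualSingleton board size c _ "W" hfm).mp hbq))]
            by_cases hqB : pvQual board size c "B"
            · rw [if_pos ((pvEqualSingleton board size c _ "B" hfm).mpr hqB)]
              refine ⟨hvchar, ?_, ?_⟩
              · rw [pvStones_append, pvTouched_append_new board size "B" P c hcd hnv,
                  if_neg (fun hh : _ = _ => by rw [hgd] at hh; exact absurd hh (by decide)),
                  if_pos hqB]
                rw [hb, hlen]; ring
              · rw [pvStones_append, pvTouched_append_new board size "W" P c hcd hnv,
                  if_neg (fun hh : _ = _ => by rw [hgd] at hh; exact absurd hh (by decide)),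
                  if_neg hqW]
                rw [hw]; ring
            · rw [if_neg (fun hbq => hqB ((pvEqualSingleton board size c _ "B" hfm).mp hbq))]
              refine ⟨hvchar, ?_, ?_⟩
              · rw [pvStones_append, pvTouched_append_new board size "B" P c hcd hnv,
                  if_neg (fun hh : _ = _ => by rw [hgd] at hh; exact absurd hh (by decide)),
                  if_neg hqB]
                rw [hb]; ring
              · rw [pvStones_append, pvTouched_append_new board size "W" P c hcd hnv,
                  if_neg (fun hh : _ = _ => by rw [hgd] at hh; exact absurd hh (by decide)),
                  if_neg hqW]
                rw [hw]; ring
        · rw [if_neg (fun hbq => hgd (beq_iff_eq.mp hbq))]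
          have hcov : ∀ p, p ∈ pvUniv size → pvGrid board p.1 p.2 = "." →
              pvReach board size "." p c → ∃ c' ∈ P, pvReach board size "." p c' := by
            intro p _ hg hr
            rcases pvReach_last board size hr with heq | hlast
            · rw [← heq] at hg; exact absurd hg hgd
            · exact absurd hlast.2 hgd
          refine ⟨?_, ?_, ?_⟩
          · intro x
            rw [hvis x]
            constructor
            · rintro ⟨c', hc', hcd', hr⟩
              exact ⟨c', List.mem_append.mpr (Or.inl hc'), hcd', hr⟩
            · rintro ⟨c', hc', hcd', hr⟩
              rcases List.mem_append.mp hc' with hc' | hc'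
              · exact ⟨c', hc', hcd', hr⟩
              · rcases List.mem_singleton.mp hc' with rfl
                exact absurd hcd'.2 hgd
          · rw [pvStones_append, pvTouched_append_covered board size "B" P c hcov,
              if_neg hgB]
            rw [hb]; ring
          · rw [pvStones_append, pvTouched_append_covered board size "W" P c hcov,
              if_neg hgW]
            rw [hw]; ring

theorem pvScan (board : List (List String)) (size : Int) :
    ∀ (L P : List (Int × Int)) (st : Int × Int × PySem.Set (Int × Int)),
      (∀ c ∈ L, c ∈ pvUniv size) → pvAInv board size P st →
      pvAInv board size (P ++ L) (L.foldl (pvAStep board size) st) := by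
  intro L
  induction L with
  | nil => intro P st _ h; simpa using h
  | cons c L ih =>
      intro P st hL h
      have h1 := pvAStep_inv board size P st c (hL c List.mem_cons_self) h
      have h2 := ih (P ++ [c]) _ (fun d hd => hL d (List.mem_cons_of_mem _ hd)) h1
      simpa [List.append_assoc] using h2

-- ---- the scan order ----
def pvCells (size : Int) : List (Int × Int) :=
  (PySem.List.pyRange 0 size 1).flatMap (fun i => (PySem.List.pyRange 0 size 1).map (fun j => (i, j)))

theorem mem_pvCells (size : Int) (p : Int × Int) : p ∈ pvCells size ↔ p ∈ pvUniv size := by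
  cases p with
  | mk a b =>
    simp [pvCells, List.mem_flatMap, List.mem_map, PySem.List.mem_pyRange_one, pvUniv,
      List.mem_toFinset]

theorem nodup_pvCells (size : Int) : (pvCells size).Nodup := by
  have h : pvCells size = (PySem.List.pyRange 0 size 1) ×ˢ (PySem.List.pyRange 0 size 1) := rfl
  rw [h]
  exact (PySem.List.nodup_pyRange_one 0 size).product (PySem.List.nodup_pyRange_one 0 size)

theorem pvFoldGrid {σ : Type} (size : Int) (f : σ → (Int × Int) → σ) :
    ∀ (init : σ),
      (PySem.List.pyRange 0 size 1).foldl (fun st i =>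
        (PySem.List.pyRange 0 size 1).foldl (fun st j => f st (i, j)) st) init =
      (pvCells size).foldl f init := by
  suffices h : ∀ (rows cols : List Int) (init : σ),
      rows.foldl (fun st i => cols.foldl (fun st j => f st (i, j)) st) init =
        (rows.flatMap (fun i => cols.map (fun j => (i, j)))).foldl f init by
    intro init; exact h _ _ init
  intro rows
  induction rows with
  | nil => intro cols init; simp
  | cons r rows ih =>
      intro cols init
      simp only [List.foldl_cons, List.flatMap_cons, List.foldl_append, List.foldl_map]
      exact ih cols _

theorem pvCard_eq_sum (size : Int) (q : (Int × Int) → Prop) :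
    ((@Finset.filter _ q (fun _ => Classical.propDecidable _) (pvUniv size)).card : Int) =
      ((pvCells size).map (fun c => @ite Int (q c) (Classical.propDecidable _) 1 0)).sum := by
  have hnd := nodup_pvCells size
  have huniv : (pvCells size).toFinset = pvUniv size := by
    apply Finset.ext; intro p; rw [List.mem_toFinset]; exact mem_pvCells size p
  rw [Finset.card_filter, ← huniv, Nat.cast_sum, List.sum_toFinset _ hnd]
  congr 1
  apply List.map_congr_left
  intro c _
  by_cases h : q c
  · rw [if_pos h, if_pos h]; rfl
  · rw [if_neg h, if_neg h]; rfl

theorem pvTouched_full (board : List (List String)) (size : Int) (col : String) :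
    pvTouched board size col (pvCells size) =
      @Finset.filter _ (fun p => pvDotQual board size col p)
        (fun _ => Classical.propDecidable _) (pvUniv size) := by
  apply Finset.ext
  intro p
  unfold pvTouched pvDotQual
  rw [pvMem_filterC, pvMem_filterC]
  constructor
  · rintro ⟨hu, hg, hq, _⟩
    exact ⟨hu, hg, hq⟩
  · rintro ⟨hu, hg, hq⟩
    exact ⟨hu, hg, hq, p, (mem_pvCells size p).mpr hu, Relation.ReflTransGen.refl⟩

-- ---- B's stone count equals the per-cell indicator sum ----
theorem pvSum_flatMap (l : List Int) (g : Int → List Int) :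
    (l.flatMap g).sum = (l.map (fun x => (g x).sum)).sum := by
  rw [List.flatMap_def, List.sum_flatten, List.map_map]
  rfl

theorem pvGetD_take (l : List String) (n : Nat) (j : Int) (d : String)
    (h0 : 0 ≤ j) (h : j < (n : Int)) (hn : n ≤ l.length) :
    PySem.List.pyGetD (l.take n) j d = PySem.List.pyGetD l j d := by
  rw [PySem.List.pyGetD_eq_getElem _ _ h0 (by rw [List.length_take_of_le hn]; exact_mod_cast h),
      PySem.List.pyGetD_eq_getElem _ _ h0 (by
        have hh : (n : Int) ≤ (l.length : Int) := by exact_mod_cast hn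
        omega)]
  exact List.getElem_take

theorem pvRowCount (row : List String) (size : Int) (col : String)
    (h0 : 0 ≤ size) (hlen : size.toNat ≤ row.length) :
    ((PySem.List.count (PySem.List.slice row none (some size)) col : Nat) : Int) =
      ((PySem.List.pyRange 0 size 1).map
        (fun j => if PySem.List.pyGetD row j "" = col then (1 : Int) else 0)).sum := by
  have hslice : PySem.List.slice row none (some size) = row.take size.toNat :=
    PySem.List.slice_to row h0
  have hlen' : (row.take size.toNat).length = size.toNat := List.length_take_of_le hlen
  have hcast : ((row.take size.toNat).length : Int) = size := by
    rw [hlen']; exact Int.toNat_of_nonneg h0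
  have hmapcongr : ((PySem.List.pyRange 0 size 1).map
        (fun j => if PySem.List.pyGetD row j "" = col then (1 : Int) else 0)) =
      ((PySem.List.pyRange 0 size 1).map
        (fun j => if PySem.List.pyGetD (row.take size.toNat) j "" = col then (1 : Int) else 0)) := by
    apply List.map_congr_left
    intro j hj
    rw [PySem.List.mem_pyRange_one] at hj
    rw [pvGetD_take row size.toNat j "" hj.1 (by rw [Int.toNat_of_nonneg h0]; exact hj.2) hlen]
  have key : ∀ (rt : List String),
      ((PySem.List.count rt col : Nat) : Int) =
        ((PySem.List.pyRange 0 ((rt.length : Nat) : Int) 1).map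
          (fun j => if PySem.List.pyGetD rt j "" = col then (1 : Int) else 0)).sum := by
    intro rt
    have hmm : ((PySem.List.pyRange 0 ((rt.length : Nat) : Int) 1).map
          (fun j => if PySem.List.pyGetD rt j "" = col then (1 : Int) else 0)) =
        ((PySem.List.pyRange 0 ((rt.length : Nat) : Int) 1).map
          (fun j => PySem.List.pyGetD rt j "")).map
          (fun x => if (x == col) = true then (1 : Int) else 0) := by
      rw [List.map_map]
      apply List.map_congr_left
      intro j _
      simp [beq_iff_eq]
    rw [hmm, PySem.List.map_pyGetD_pyRange_zero', PySem.List.sum_map_ite_one_zero,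
      PySem.List.count_eq, List.count_eq_countP]
  have hk := key (row.take size.toNat)
  rw [hcast] at hk
  rw [hslice, hmapcongr, hk]

theorem pvGrid_row (board : List (List String)) (i j : Int) :
    pvGrid board i j = PySem.List.pyGetD (PySem.List.pyGetD board i []) j "" := rfl

theorem pvMapRows {β : Type} (board : List (List String)) (F : List String → β) :
    (PySem.List.pyRange 0 (board.length : Int) 1).map
        (fun i => F (PySem.List.pyGetD board i [])) = board.map F := by
  rw [show (fun i => F (PySem.List.pyGetD board i [])) =
      F ∘ (fun i => PySem.List.pyGetD board i ([] : List String)) from rfl,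
    ← List.map_map, PySem.List.map_pyGetD_pyRange_zero']

theorem pvStonesB (board : List (List String)) (col : String)
    (hpre : ∀ row ∈ board, board.length ≤ row.length) :
    (board.map (fun row =>
        ((PySem.List.count (PySem.List.slice row none (some (board.length : Int))) col : Nat) : Int))).sum
      = pvStones board col (pvCells (board.length : Int)) := by
  unfold pvStones
  have h1 : ((pvCells (board.length : Int)).map
      (fun c => if pvGrid board c.1 c.2 = col then (1 : Int) else 0)) =
      (PySem.List.pyRange 0 (board.length : Int) 1).flatMap
        (fun i => (PySem.List.pyRange 0 (board.length : Int) 1).map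
          (fun j => if pvGrid board i j = col then (1 : Int) else 0)) := by
    rw [pvCells, List.map_flatMap]
    simp only [List.map_map]
    rfl
  rw [h1, pvSum_flatMap]
  have h2 : ∀ i ∈ PySem.List.pyRange 0 (board.length : Int) 1,
      ((PySem.List.pyRange 0 (board.length : Int) 1).map
          (fun j => if pvGrid board i j = col then (1 : Int) else 0)).sum =
        ((PySem.List.count (PySem.List.slice (PySem.List.pyGetD board i [])
            none (some (board.length : Int))) col : Nat) : Int) := by
    intro i hi
    rw [PySem.List.mem_pyRange_one] at hi
    have hrow : PySem.List.pyGetD board i [] ∈ board :=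
      PySem.List.pyGetD_mem board [] ⟨by omega, by exact_mod_cast hi.2⟩
    have hlen : board.length ≤ (PySem.List.pyGetD board i []).length := hpre _ hrow
    rw [pvRowCount _ (board.length : Int) col (Int.natCast_nonneg _)
      (by rw [Int.toNat_natCast]; exact hlen)]
    refine congrArg List.sum ?_
    apply List.map_congr_left
    intro j _
    rw [pvGrid_row]
  rw [List.map_congr_left h2]
  rw [pvMapRows board (fun row =>
    ((PySem.List.count (PySem.List.slice row none (some (board.length : Int))) col : Nat) : Int))]

-- ---- B's empties list and territory count ----
theorem pvEmptiesEq (board : List (List String)) (n : Int) :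
    ((PySem.List.pyRange 0 n 1).flatMap (fun i =>
        ((PySem.List.pyRange 0 n 1).filter (fun j => pvCell board (i, j) == ".")).map
          (fun j => ((i : Int), (j : Int))))) =
      (pvCells n).filter (fun p => pvGrid board p.1 p.2 == ".") := by
  rw [pvCells, List.filter_flatMap]
  simp only [List.filter_map]
  rfl

theorem pvTerrB (board : List (List String)) (n : Int) (col : String) :
    (((PySem.List.pyRange 0 n 1).flatMap (fun i =>
          ((PySem.List.pyRange 0 n 1).filter (fun j => pvCell board (i, j) == ".")).map
            (fun j => ((i : Int), (j : Int))))).countP (fun p =>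
        PySem.Set.equal (pvFenceColours board n p) (PySem.Set.ofList [col])) : Int) =
      ((pvTouched board n col (pvCells n)).card : Int) := by
  rw [pvEmptiesEq, pvTouched_full, pvCard_eq_sum, List.countP_filter,
    ← PySem.List.sum_map_ite_one_zero]
  apply congrArg
  apply List.map_congr_left
  intro c _
  have hEq : (PySem.Set.equal (pvFenceColours board n c) (PySem.Set.ofList [col]) = true) ↔
      pvQual board n c col :=
    pvEqualSingleton board n c _ col (mem_pvFenceColours board n c)
  by_cases hdot : pvGrid board c.1 c.2 = "."
  · by_cases hq : pvQual board n c col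
    · have hdq : pvDotQual board n col c := ⟨hdot, hq⟩
      rw [if_pos (by rw [Bool.and_eq_true]; exact ⟨hEq.mpr hq, beq_iff_eq.mpr hdot⟩), if_pos hdq]
    · rw [if_neg (by
          rw [Bool.and_eq_true]
          rintro ⟨h1, _⟩
          exact hq (hEq.mp h1)),
        if_neg (fun hh : pvDotQual board n col c => hq hh.2)]
  · rw [if_neg (by
        rw [Bool.and_eq_true]
        rintro ⟨_, h2⟩
        exact hdot (beq_iff_eq.mp h2)),
      if_neg (fun hh : pvDotQual board n col c => hdot hh.1)]

-- ---- main equivalence ----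
theorem pvMain (board : List (List String))
    (hpre : Pre_count_chinese_score board) :
    count_chinese_score board = count_chinese_score_alt board := by
  unfold count_chinese_score count_chinese_score_alt
  simp only []
  rw [pvFoldGrid]
  have hempty : ∀ col, pvTouched board (board.length : Int) col [] = ∅ := by
    intro col
    apply Finset.ext
    intro p
    unfold pvTouched
    rw [pvMem_filterC]
    simp
  have base : pvAInv board (board.length : Int) [] (0, 0, PySem.Set.empty) := by
    refine ⟨?_, ?_, ?_⟩
    · intro x
      constructor
      · intro hx; cases hx
      · rintro ⟨c', hc', _⟩; cases hc'
    · rw [hempty]; simp [pvStones]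
    · rw [hempty]; simp [pvStones]
  have hscan := pvScan board (board.length : Int) (pvCells (board.length : Int)) []
    (0, 0, PySem.Set.empty) (fun c hcc => (mem_pvCells _ c).mp hcc) base
  rw [List.nil_append] at hscan
  obtain ⟨_, hbA, hwA⟩ := hscan
  refine Prod.ext ?_ ?_
  · rw [hbA, pvStonesB board "B" hpre, pvTerrB board (board.length : Int) "B"]
  · rw [hwA, pvStonesB board "W" hpre, pvTerrB board (board.length : Int) "W"]

-- ===== VERDICT (by name: the statement is the Claim_ definition above) =====
theorem count_chinese_score_spec : Claim_equal_count_chinese_score := by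
  intro board _ hpre
  unfold Spec_count_chinese_score
  exact pvMain board hpre
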